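-- pv_equiv track=rewrite | github.com/encrypted-oreo/codewars-solutions | 3kyu/help_the_general_decode_secret_enemy_messages.py | _decrypt_one101
-- ===== SOURCE A (Python) =====
-- _LETTERS101 = "abcdefghijklmnopqrstuvwxyzABCDEFGHIJKLMNOPQRSTUVWXYZ0123456789.,? *"
--
-- def _decrypt_one101(c, n):
--     for i in range(n):
--         ind = _LETTERS101.find(c)
--         for j in range(len(_LETTERS101)):
--             if _LETTERS101[((j+1) * 2 - 1) % len(_LETTERS101)] == c:
--                 c = _LETTERS101[j]
--                 break
--     return c
-- ===== SOURCE B (Python) =====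
-- _LETTERS101 = "abcdefghijklmnopqrstuvwxyzABCDEFGHIJKLMNOPQRSTUVWXYZ0123456789.,? *"
--
--
-- def _decrypt_one101(c, n):
--     # Closed-form: one decryption step sends the letter at index p to index
--     # (34*p + 33) % 67 (the inverse of p -> (2*p + 1) % 67).  Instead of
--     # applying the step n times, walk the cycle of p once and take n modulo
--     # the cycle length.
--     p = _LETTERS101.find(c) if len(c) == 1 else -1
--     if p < 0 or n <= 0:
--         return c
--     cycle = [p]
--     q = (34 * p + 33) % 67
--     while q != p:
--         cycle.append(q)
--         q = (34 * q + 33) % 67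
--     return _LETTERS101[cycle[n % len(cycle)]]
-- ===== Notes on version B (the rewrite author's own statement) =====
-- stated objective: faster
-- what changed: Instead of applying the inverse-permutation step n times (each step scanning all 67 letters), B looks the character up once, walks its cycle under the inverse step a single time, and indexes the cycle at n mod its length.
import Mathlib
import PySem

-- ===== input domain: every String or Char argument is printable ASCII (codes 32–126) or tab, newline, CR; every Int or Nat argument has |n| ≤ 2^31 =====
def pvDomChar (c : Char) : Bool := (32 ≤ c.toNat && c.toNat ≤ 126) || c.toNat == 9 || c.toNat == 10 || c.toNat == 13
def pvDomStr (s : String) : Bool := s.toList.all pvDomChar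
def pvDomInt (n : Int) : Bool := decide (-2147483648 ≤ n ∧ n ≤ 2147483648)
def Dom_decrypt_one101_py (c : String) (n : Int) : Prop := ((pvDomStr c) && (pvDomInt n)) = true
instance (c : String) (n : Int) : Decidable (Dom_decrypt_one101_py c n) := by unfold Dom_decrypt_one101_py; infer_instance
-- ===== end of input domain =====

-- B replaces A's n-fold application of the 67-letter inverse-permutation step (each step a
-- linear scan) by a single lookup plus one walk of the character's cycle, indexed at n mod
-- the cycle length; a timing run measures the speed-up.

def pvLetters : String := "abcdefghijklmnopqrstuvwxyzABCDEFGHIJKLMNOPQRSTUVWXYZ0123456789.,? *"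

-- `s[i]` as a 1-character Python string (index always in range where used; `d` is dead)
def pvCharStr (s : String) (i : Int) (d : String) : String :=
  match PySem.Str.pyGet? s i with
  | some ch => String.ofList [ch]
  | none => d

-- `letters[i] == c` (comparison of the 1-char string at an in-range index with c)
def pvCharEq (oc : Option Char) (c : String) : Bool :=
  match oc with
  | some ch => c.toList == [ch]
  | none => false

-- ===== PORT A =====
-- inner `for j in range(len(letters)): if letters[((j+1)*2-1) % len(letters)] == c: c = letters[j]; break`
def pvInner (c : String) : String :=
  match (PySem.List.pyRange 0 (PySem.Str.len pvLetters) 1).find? (fun j =>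
      pvCharEq (PySem.Str.pyGet? pvLetters
        (PySem.Int.mod ((j + 1) * 2 - 1) (PySem.Str.len pvLetters))) c) with
  | some j => pvCharStr pvLetters j c
  | none => c

def decrypt_one101_py (c : String) (n : Int) : String :=
  (PySem.List.pyRange 0 n 1).foldl (fun c _ =>
    let _ind := PySem.Str.find pvLetters c   -- `ind = _LETTERS101.find(c)` (unused, as in A)
    pvInner c) c

-- ===== PORT B =====
def pvStep (q : Int) : Int := PySem.Int.mod (34 * q + 33) 67

-- the `while q != p` loop of Source B (fuel 67 ≥ any cycle length of a permutation of 67 points)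
def pvCycleAux (fuel : Nat) (q p : Int) : List Int :=
  match fuel with
  | 0 => []
  | f + 1 => if q = p then [] else q :: pvCycleAux f (pvStep q) p

def decrypt_one101_py_alt (c : String) (n : Int) : String :=
  let p := if PySem.Str.len c = 1 then PySem.Str.find pvLetters c else -1
  if p < 0 ∨ n ≤ 0 then c
  else
    let cycle := p :: pvCycleAux 67 (pvStep p) p
    pvCharStr pvLetters
      (PySem.List.pyGetD cycle (PySem.Int.mod n (cycle.length : Int)) 0) c

-- ===== PRECONDITION & SPEC =====
def Spec_decrypt_one101_py (c : String) (n : Int) (out : String) : Prop := out = decrypt_one101_py_alt c n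
instance (c : String) (n : Int) (out : String) : Decidable (Spec_decrypt_one101_py c n out) := by unfold Spec_decrypt_one101_py; infer_instance

-- ===== CLAIM (what is proved, stated in full; the proofs are below) =====
def Claim_equal_decrypt_one101_py : Prop := ∀ (c : String) (n : Int), Dom_decrypt_one101_py c n → Spec_decrypt_one101_py c n (decrypt_one101_py c n)

-- ===== LEMMAS AND PROOFS =====
set_option maxRecDepth 20000
set_option maxHeartbeats 1000000

-- the letter at Nat index p, as a 1-char string (proof-side)
def pvChr (p : Nat) : String := String.ofList [pvLetters.toList.getD p ' ']

-- the index step on Nat indices (proof-side)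
def pvG (p : Nat) : Nat := (34 * p + 33) % 67

-- A's loop body, named
def pvBody (c : String) : String :=
  let _ind := PySem.Str.find pvLetters c
  pvInner c

-- the concrete cycle of p (proof-side name for B's cycle list)
def pvCyc (p : Nat) : List Int := (p : Int) :: pvCycleAux 67 (pvStep (p : Int)) (p : Int)

theorem pvLetters_len : pvLetters.toList.length = 67 := by decide

theorem pvFoldl_const {f : String → String} (c : String) (h : f c = c) :
    ∀ l : List Int, l.foldl (fun x _ => f x) c = c := by
  intro l; induction l with
  | nil => rfl
  | cons a t ih => simpa [List.foldl, h] using ih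

theorem pvFoldl_iterate (f : String → String) :
    ∀ (l : List Int) (c : String), l.foldl (fun x _ => f x) c = f^[l.length] c := by
  intro l; induction l with
  | nil => intro c; rfl
  | cons a t ih =>
      intro c
      simp [List.foldl, ih, Function.iterate_succ_apply]

theorem pvBody_chr (p : Nat) (hp : p < 67) : pvBody (pvChr p) = pvChr (pvG p) := by
  revert p; decide

theorem pvG_lt (p : Nat) : pvG p < 67 := Nat.mod_lt _ (by norm_num)

theorem pvG_iter_lt (k p : Nat) (hp : p < 67) : pvG^[k] p < 67 := by
  induction k generalizing p with
  | zero => exact hp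
  | succ k ih => rw [Function.iterate_succ_apply]; exact ih _ (pvG_lt p)

theorem pvIter_chr (k p : Nat) (hp : p < 67) :
    pvBody^[k] (pvChr p) = pvChr (pvG^[k] p) := by
  induction k generalizing p with
  | zero => rfl
  | succ k ih =>
      rw [Function.iterate_succ_apply, pvBody_chr p hp, ih (pvG p) (pvG_lt p),
        Function.iterate_succ_apply]

theorem pvCyc_pos (p : Nat) : 0 < (pvCyc p).length := by simp [pvCyc]

theorem pvCyc_get (p : Nat) (hp : p < 67) :
    ∀ i, i < (pvCyc p).length → (pvCyc p).getD i 0 = ((pvG^[i] p : Nat) : Int) := by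
  revert p; decide

theorem pvCyc_period (p : Nat) (hp : p < 67) : pvG^[(pvCyc p).length] p = p := by
  revert p; decide

theorem pvG_iterate_mod (p : Nat) (hp : p < 67) (k : Nat) :
    pvG^[k] p = pvG^[k % (pvCyc p).length] p := by
  set L := (pvCyc p).length with hL
  conv_lhs => rw [← Nat.mod_add_div k L]
  rw [Function.iterate_add_apply, Function.iterate_mul]
  congr 1
  exact Function.iterate_fixed (pvCyc_period p hp) _

theorem pvFind_chr (p : Nat) (hp : p < 67) :
    PySem.Str.find pvLetters (pvChr p) = (p : Int) := by
  revert p; decide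

theorem pvLen_chr (p : Nat) (hp : p < 67) : PySem.Str.len (pvChr p) = 1 := by
  revert p; decide

theorem pvCharStr_chr (q : Nat) (hq : q < 67) (d : String) :
    pvCharStr pvLetters ((q : Nat) : Int) d = pvChr q := by
  have hlt : q < pvLetters.toList.length := by rw [pvLetters_len]; exact hq
  unfold pvCharStr
  rw [PySem.Str.pyGet?_natCast, List.getElem?_eq_getElem hlt]
  simp [pvChr, List.getElem?_eq_getElem hlt]

-- if c is none of the 67 letters, A's inner scan leaves c unchanged
theorem pvInner_id (c : String) (h : ∀ p : Nat, p < 67 → c ≠ pvChr p) : pvInner c = c := by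
  have hfind : (PySem.List.pyRange 0 (PySem.Str.len pvLetters) 1).find? (fun j =>
      pvCharEq (PySem.Str.pyGet? pvLetters
        (PySem.Int.mod ((j + 1) * 2 - 1) (PySem.Str.len pvLetters))) c) = none := by
    rw [List.find?_eq_none]
    intro j hj
    have hlen : PySem.Str.len pvLetters = (67 : Int) := by decide
    rw [hlen] at hj ⊢
    have hjb : 0 ≤ j ∧ j < 67 := by
      have := (PySem.List.mem_pyRange_one).1 hj; omega
    set i : Int := PySem.Int.mod ((j + 1) * 2 - 1) 67 with hi
    have hi0 : 0 ≤ i := PySem.Int.mod_nonneg _ (by norm_num)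
    have hi67 : i < 67 := PySem.Int.mod_lt _ (by norm_num)
    have hlt : i.toNat < pvLetters.toList.length := by rw [pvLetters_len]; omega
    rw [show i = ((i.toNat : Nat) : Int) by omega, PySem.Str.pyGet?_natCast,
      List.getElem?_eq_getElem hlt]
    simp only [pvCharEq, beq_iff_eq]
    intro hc
    apply h i.toNat (by omega)
    have h2 : pvChr i.toNat = String.ofList [pvLetters.toList[i.toNat]] := by
      simp [pvChr, List.getElem?_eq_getElem hlt]
    rw [h2, ← hc, String.ofList_toList]
  unfold pvInner
  rw [hfind]

theorem pvBody_id (c : String) (h : ∀ p : Nat, p < 67 → c ≠ pvChr p) : pvBody c = c := by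
  simpa [pvBody] using pvInner_id c h

-- if c is none of the 67 letters, B's lookup fails
theorem pvAltGuard (c : String) (h : ∀ p : Nat, p < 67 → c ≠ pvChr p) :
    (if PySem.Str.len c = 1 then PySem.Str.find pvLetters c else -1) < 0 := by
  split_ifs with hlen
  · have hlist : c.toList.length = 1 := by
      have := PySem.Str.len_eq c
      omega
    obtain ⟨ch, hch⟩ : ∃ ch, c.toList = [ch] := by
      cases hc : c.toList with
      | nil => simp [hc] at hlist
      | cons a t => cases t with
        | nil => exact ⟨a, rfl⟩
        | cons b u => simp [hc] at hlist
    have hnotmem : ch ∉ pvLetters.toList := by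
      intro hmem
      obtain ⟨i, hi, hgi⟩ := List.mem_iff_getElem.mp hmem
      apply h i (by rw [pvLetters_len] at hi; exact hi)
      have h2 : pvChr i = String.ofList [ch] := by
        simp [pvChr, List.getElem?_eq_getElem hi, hgi]
      rw [h2, ← hch, String.ofList_toList]
    have hninf : ¬ c.toList <:+: pvLetters.toList := by
      intro hinf
      exact hnotmem (hinf.sublist.mem (by simp [hch]))
    have := (PySem.Str.find_eq_neg_one_iff pvLetters c).2 hninf
    omega
  · norm_num

theorem pvMain : ∀ (c : String) (n : Int),
    decrypt_one101_py c n = decrypt_one101_py_alt c n := by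
  intro c n
  by_cases hn : n ≤ 0
  · have hr : PySem.List.pyRange 0 n 1 = [] := PySem.List.pyRange_one_eq_nil (by omega)
    have hA : decrypt_one101_py c n = c := by simp [decrypt_one101_py, hr]
    have hB : decrypt_one101_py_alt c n = c := by
      simp only [decrypt_one101_py_alt]
      rw [if_pos (Or.inr hn)]
    rw [hA, hB]
  · push_neg at hn
    by_cases hc : ∃ p : Nat, p < 67 ∧ c = pvChr p
    · obtain ⟨p, hp, rfl⟩ := hc
      have hA : decrypt_one101_py (pvChr p) n = pvChr (pvG^[n.toNat] p) := by
        rw [decrypt_one101_py]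
        rw [show (fun (c : String) (_ : Int) =>
              let _ind := PySem.Str.find pvLetters c
              pvInner c) = (fun c _ => pvBody c) from rfl,
            pvFoldl_iterate pvBody _ _, PySem.List.length_pyRange_one]
        simpa using pvIter_chr n.toNat p hp
      have hB : decrypt_one101_py_alt (pvChr p) n
          = pvCharStr pvLetters ((pvCyc p).getD (n.toNat % (pvCyc p).length) 0) (pvChr p) := by
        simp only [decrypt_one101_py_alt]
        rw [pvLen_chr p hp, if_pos rfl, pvFind_chr p hp]
        rw [if_neg (by
          push_neg
          exact ⟨by positivity, by omega⟩)]
        rw [show ((p : Int) :: pvCycleAux 67 (pvStep (p : Int)) (p : Int)) = pvCyc p from rfl]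
        have hnn : n = (n.toNat : Int) := by omega
        have hmod : PySem.Int.mod n ((pvCyc p).length : Int)
            = ((n.toNat % (pvCyc p).length : Nat) : Int) := by
          rw [hnn]; exact PySem.Int.mod_natCast n.toNat (pvCyc p).length
        rw [hmod, PySem.List.pyGetD_natCast]
      rw [hA, hB]
      have hrlt : n.toNat % (pvCyc p).length < (pvCyc p).length :=
        Nat.mod_lt _ (pvCyc_pos p)
      rw [pvCyc_get p hp _ hrlt, pvG_iterate_mod p hp n.toNat,
        pvCharStr_chr _ (pvG_iter_lt _ p hp) _]
    · push_neg at hc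
      have hA : decrypt_one101_py c n = c := by
        rw [decrypt_one101_py]
        exact pvFoldl_const c (pvBody_id c fun p hp => hc p hp) _
      have hB : decrypt_one101_py_alt c n = c := by
        simp only [decrypt_one101_py_alt]
        rw [if_pos (Or.inl (pvAltGuard c fun p hp => hc p hp))]
      rw [hA, hB]

-- ===== VERDICT (by name: the statement is the Claim_ definition above) =====
theorem decrypt_one101_py_spec : Claim_equal_decrypt_one101_py := by
  intro c n _
  unfold Spec_decrypt_one101_py
  exact pvMain c n
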